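-- pv_equiv track=rewrite | github.com/element154/SkillGym-develop | ready/task_t430_run2/tests/test_outputs.py | compute_degree_histogram
-- ===== SOURCE A (Python) =====
-- from collections import defaultdict
-- from typing import Dict, List, Tuple
--
-- def compute_degree_histogram(bus_ids: List[int], branches: List[Tuple[int, int, int]]) -> Dict[int, int]:
--     """
--     Compute degree histogram from bus IDs and branches.
--
--     Only counts in-service branches (status == 1).
--     Degrees are keyed by actual bus ID, not row index.
--     """
--     # Initialize degree count for all buses
--     degree_count = {bus_id: 0 for bus_id in bus_ids}
--
--     # Count degrees from in-service branches only
--     for fbus, tbus, status in branches: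
--         if status == 1:  # Only in-service branches
--             if fbus in degree_count:
--                 degree_count[fbus] += 1
--             if tbus in degree_count:
--                 degree_count[tbus] += 1
--
--     # Build histogram: degree -> count of buses with that degree
--     histogram = defaultdict(int)
--     for bus_id, degree in degree_count.items():
--         histogram[degree] += 1
--
--     # Remove degrees with zero count (per specification)
--     return {k: v for k, v in histogram.items() if v > 0}
-- ===== SOURCE B (Python) =====
-- def compute_degree_histogram(bus_ids, branches):
--     """Brute-force: per-bus degree by scanning live branches, then first-occurrence tally; no counting dicts."""
--     buses = []
--     for b in bus_ids:
--         if b not in buses: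
--             buses.append(b)
--     live = [(f, t) for f, t, s in branches if s == 1]
--     degrees = [sum((f == b) + (t == b) for f, t in live) for b in buses]
--     hist = {}
--     for d in degrees:
--         if d not in hist:
--             hist[d] = degrees.count(d)
--     return hist
-- ===== Notes on version B (the rewrite author's own statement) =====
-- stated objective: alternative
-- what changed: B uses no counting dictionaries at all: it dedups the buses with an explicit list loop, computes each bus's degree by summing equality indicators over a prefiltered list of live branch endpoints (brute-force scan per bus), and builds the histogram by first-occurrence tallying with degrees.count(d); A instead pre-zeroes a per-bus dict, increments it per branch, and folds a defaultdict histogram with a final v>0 filter.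
import Mathlib
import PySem

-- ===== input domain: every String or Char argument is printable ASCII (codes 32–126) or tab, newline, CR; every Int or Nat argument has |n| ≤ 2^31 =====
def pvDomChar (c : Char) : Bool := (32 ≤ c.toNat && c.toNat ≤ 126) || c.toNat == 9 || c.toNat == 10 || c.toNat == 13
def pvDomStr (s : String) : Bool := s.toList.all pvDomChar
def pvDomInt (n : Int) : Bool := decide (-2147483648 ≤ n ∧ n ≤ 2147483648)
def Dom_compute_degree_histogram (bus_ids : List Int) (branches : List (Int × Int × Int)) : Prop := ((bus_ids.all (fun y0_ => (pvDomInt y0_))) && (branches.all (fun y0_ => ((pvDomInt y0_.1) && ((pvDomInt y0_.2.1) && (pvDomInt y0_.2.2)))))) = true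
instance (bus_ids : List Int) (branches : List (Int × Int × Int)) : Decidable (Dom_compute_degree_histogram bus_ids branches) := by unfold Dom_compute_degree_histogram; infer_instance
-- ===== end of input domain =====

-- B drops every counting dictionary: it computes each distinct bus's degree by a brute-force
-- scan of the prefiltered live branches and tallies the histogram by first-occurrence lookup
-- with degrees.count (objective: alternative — same result by a scan-based algorithm).

-- ===== PORT A =====
def compute_degree_histogram (bus_ids : List Int) (branches : List (Int × Int × Int)) : List (Int × Int) :=
  -- degree_count = {bus_id: 0 for bus_id in bus_ids}
  let degree_count : PySem.Dict Int Int :=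
    bus_ids.foldl (fun d b => d.insert b 0) PySem.Dict.empty
  -- for fbus, tbus, status in branches: …
  let degree_count :=
    branches.foldl (fun d br =>
      if br.2.2 = 1 then
        let d := if d.contains br.1 then d.insert br.1 (d.getD br.1 0 + 1) else d
        if d.contains br.2.1 then d.insert br.2.1 (d.getD br.2.1 0 + 1) else d
      else d) degree_count
  -- histogram = defaultdict(int); for bus_id, degree in degree_count.items(): histogram[degree] += 1
  let histogram : PySem.Dict Int Int :=
    degree_count.items.foldl (fun h p => h.modify p.2 0 (· + 1)) PySem.Dict.empty
  -- {k: v for k, v in histogram.items() if v > 0}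
  histogram.items.filter (fun p => decide (0 < p.2))

-- ===== PORT B =====
def compute_degree_histogram_alt (bus_ids : List Int) (branches : List (Int × Int × Int)) : List (Int × Int) :=
  -- buses = []; for b in bus_ids: if b not in buses: buses.append(b)
  let buses : List Int :=
    bus_ids.foldl (fun acc b => if b ∈ acc then acc else acc ++ [b]) []
  -- live = [(f, t) for f, t, s in branches if s == 1]
  let live : List (Int × Int) :=
    (branches.filter (fun br => br.2.2 == 1)).map (fun br => (br.1, br.2.1))
  -- degrees = [sum((f == b) + (t == b) for f, t in live) for b in buses]
  let degrees : List Int :=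
    buses.map (fun b =>
      (live.map (fun p => (if p.1 == b then (1 : Int) else 0) + (if p.2 == b then 1 else 0))).sum)
  -- hist = {}; for d in degrees: if d not in hist: hist[d] = degrees.count(d)
  let hist : PySem.Dict Int Int :=
    degrees.foldl (fun h d =>
      if h.contains d then h else h.insert d ((degrees.count d : Int))) PySem.Dict.empty
  hist.items

-- ===== PRECONDITION & SPEC =====
def Spec_compute_degree_histogram (bus_ids : List Int) (branches : List (Int × Int × Int)) (out : List (Int × Int)) : Prop := out = compute_degree_histogram_alt bus_ids branches
instance (bus_ids : List Int) (branches : List (Int × Int × Int)) (out : List (Int × Int)) : Decidable (Spec_compute_degree_histogram bus_ids branches out) := by unfold Spec_compute_degree_histogram; infer_instance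

-- ===== CLAIM (what is proved, stated in full; the proofs are below) =====
def Claim_equal_compute_degree_histogram : Prop := ∀ (bus_ids : List Int) (branches : List (Int × Int × Int)), Dom_compute_degree_histogram bus_ids branches → Spec_compute_degree_histogram bus_ids branches (compute_degree_histogram bus_ids branches)

-- ===== LEMMAS AND PROOFS =====

-- the in-service endpoint stream, filtered through the bus set L
def pvFlat (L : List Int) (branches : List (Int × Int × Int)) : List Int :=
  branches.flatMap (fun br =>
    if br.2.2 = 1 then [br.1, br.2.1].filter (fun e => decide (e ∈ L)) else [])

-- the fresh keys B's tally loop inserts, in order, starting from the seen-set `seen`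
def pvFresh (seen : List Int) : List Int → List Int
  | [] => []
  | d :: rest => if d ∈ seen then pvFresh seen rest else d :: pvFresh (seen ++ [d]) rest

-- A's zero-initialisation: lookup is `some 0` on the listed buses, untouched elsewhere
theorem pv_init_get? (xs : List Int) (d : PySem.Dict Int Int) (k : Int) :
    (xs.foldl (fun d b => d.insert b 0) d).get? k
      = if k ∈ xs then some 0 else d.get? k := by
  induction xs generalizing d with
  | nil => simp
  | cons x xs ih =>
    simp only [List.foldl_cons, ih, List.mem_cons, PySem.Dict.get?_insert]
    by_cases hxs : k ∈ xs <;> by_cases hkx : k = x <;> simp [hxs, hkx]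

-- one conditional increment of A's branch loop: keys unchanged, counts one filtered endpoint
theorem pv_condStep (d : PySem.Dict Int Int) (x : Int) (k : Int) :
    (if d.contains x then d.insert x (d.getD x 0 + 1) else d).keys = d.keys ∧
    (if d.contains x then d.insert x (d.getD x 0 + 1) else d).getD k 0
      = d.getD k 0 + (([x].filter (fun e => decide (e ∈ d.keys))).count k : Int) := by
  rw [PySem.Dict.contains_eq_decide_mem_keys]
  by_cases hx : x ∈ d.keys
  · refine ⟨by simp [hx, PySem.Dict.keys_insert_of_contains,
      PySem.Dict.contains_eq_decide_mem_keys], ?_⟩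
    by_cases hkx : k = x
    · simp [hx, hkx]
    · have hxk : ¬ x = k := fun h => hkx h.symm
      simp [hx, hkx, hxk, PySem.Dict.getD_insert]
  · simp [hx]

-- A's branch loop: keys preserved, each lookup grows by this key's count in the endpoint stream
theorem pv_branch_loop (branches : List (Int × Int × Int)) (L : List Int)
    (d : PySem.Dict Int Int) (hk : d.keys = L) :
    (branches.foldl (fun d br =>
        if br.2.2 = 1 then
          let d := if d.contains br.1 then d.insert br.1 (d.getD br.1 0 + 1) else d
          if d.contains br.2.1 then d.insert br.2.1 (d.getD br.2.1 0 + 1) else d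
        else d) d).keys = L ∧
    ∀ k, (branches.foldl (fun d br =>
        if br.2.2 = 1 then
          let d := if d.contains br.1 then d.insert br.1 (d.getD br.1 0 + 1) else d
          if d.contains br.2.1 then d.insert br.2.1 (d.getD br.2.1 0 + 1) else d
        else d) d).getD k 0
      = d.getD k 0 + (pvFlat L branches).count k := by
  induction branches generalizing d with
  | nil => simpa [pvFlat] using hk
  | cons br rest ih =>
    obtain ⟨f, t, s⟩ := br
    by_cases hs : s = 1
    · subst hs
      have h1 := pv_condStep d f
      set d1 := if d.contains f then d.insert f (d.getD f 0 + 1) else d with hd1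
      have hd1keys : d1.keys = L := (h1 t).1 ▸ hk
      have h2 := pv_condStep d1 t
      set d2 := if d1.contains t then d1.insert t (d1.getD t 0 + 1) else d1 with hd2
      have hd2keys : d2.keys = L := (h2 f).1 ▸ hd1keys
      have := ih d2 hd2keys
      refine ⟨?_, ?_⟩
      · simpa [← hd1, ← hd2] using this.1
      · intro k
        have hrest := this.2 k
        have hstep1 := (h1 k).2
        have hstep2 := (h2 k).2
        rw [hk] at hstep1; rw [hd1keys] at hstep2
        have hflat : (pvFlat L ((f, t, 1) :: rest)).count k
            = ([f].filter (fun e => decide (e ∈ L))).count k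
              + ([t].filter (fun e => decide (e ∈ L))).count k
              + (pvFlat L rest).count k := by
          by_cases hf : f ∈ L <;> by_cases ht : t ∈ L <;>
            simp [pvFlat, List.filter, hf, ht, List.count_cons, List.count_nil] <;> omega
        simp only [List.foldl_cons, if_pos, ← hd1, ← hd2] at hrest ⊢
        rw [hrest, hstep2, hstep1, hflat]
        push_cast; ring
    · have := ih d hk
      constructor
      · simpa [hs] using this.1
      · intro k
        have h := this.2 k
        simp only [List.foldl_cons, hs, pvFlat, List.flatMap_cons] at h ⊢
        simpa [hs] using h

-- every value of a counter dict is positive, so A's final `v > 0` filter keeps everything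
theorem pv_counter_filter (xs : List Int) :
    (PySem.Dict.counter xs).items.filter (fun p => decide (0 < p.2))
      = (PySem.Dict.counter xs).items := by
  rw [List.filter_eq_self]
  intro p hp
  rw [PySem.Dict.items_counter] at hp
  obtain ⟨k, hk, rfl⟩ := List.mem_map.mp hp
  have hmem : k ∈ xs := (PySem.Set.mem_ofList xs k).mp hk
  have hcnt : 0 < xs.count k := List.count_pos_iff.mpr hmem
  simpa using hcnt

-- the list function B's dedup loop folds with IS Set.add
theorem pv_add_eq (acc : List Int) (b : Int) :
    PySem.Set.add acc b = if b ∈ acc then acc else acc ++ [b] := by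
  simp [PySem.Set.add, PySem.Set.contains]

theorem pv_add_fun :
    (PySem.Set.add : List Int → Int → List Int)
      = fun acc b => if b ∈ acc then acc else acc ++ [b] :=
  funext fun a => funext fun b => pv_add_eq a b

theorem pv_dedup_loop (bus_ids : List Int) :
    bus_ids.foldl (fun acc b => if b ∈ acc then acc else acc ++ [b]) []
      = PySem.List.dedup bus_ids := by
  rw [PySem.List.dedup_eq_ofList, PySem.Set.ofList_eq_foldl, pv_add_fun]

-- one endpoint's contribution: count of b in the filtered singleton, as a 0/1 value
theorem pv_single (L : List Int) (b x : Int) (hb : b ∈ L) :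
    ((([x].filter (fun e => decide (e ∈ L))).count b : Int)) = if x = b then 1 else 0 := by
  by_cases hx : x = b
  · subst hx; simp [hb]
  · by_cases hxL : x ∈ L <;> simp [hxL, hx]

-- B's per-bus indicator sum = this bus's count in the filtered endpoint stream
theorem pv_deg (b : Int) (L : List Int) (hb : b ∈ L) (branches : List (Int × Int × Int)) :
    (((branches.filter (fun br => br.2.2 == 1)).map (fun br => (br.1, br.2.1))).map
      (fun p => (if p.1 == b then (1 : Int) else 0) + (if p.2 == b then 1 else 0))).sum
      = ((pvFlat L branches).count b : Int) := by
  induction branches with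
  | nil => simp [pvFlat]
  | cons br rest ih =>
    obtain ⟨f, t, s⟩ := br
    by_cases hs : s = 1
    · subst hs
      have hsplit : [f, t].filter (fun e => decide (e ∈ L))
          = [f].filter (fun e => decide (e ∈ L)) ++ [t].filter (fun e => decide (e ∈ L)) := by
        by_cases hf : f ∈ L <;> by_cases ht : t ∈ L <;> simp [List.filter, hf, ht]
      have hpair : ((([f, t].filter (fun e => decide (e ∈ L))).count b : Int))
          = (if f = b then 1 else 0) + (if t = b then 1 else 0) := by
        rw [hsplit, List.count_append, Nat.cast_add, pv_single L b f hb, pv_single L b t hb]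
      have hflat : ((pvFlat L ((f, t, 1) :: rest)).count b : Int)
          = (([f, t].filter (fun e => decide (e ∈ L))).count b : Int)
            + ((pvFlat L rest).count b : Int) := by
        simp [pvFlat, List.count_append]
      rw [hflat, hpair]
      simp only [List.filter_cons, List.map_cons, List.sum_cons,
        show ((1 : Int) == 1) = true from rfl, if_pos]
      rw [ih]
      simp only [beq_iff_eq]
    · have hcnt : pvFlat L ((f, t, s) :: rest) = pvFlat L rest := by
        simp [pvFlat, hs]
      have hsf : ((s : Int) == 1) = false := by simpa using hs
      rw [hcnt, List.filter_cons]
      simp only [hsf, Bool.false_eq_true, ite_false]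
      exact ih

-- pvFresh from an arbitrary seen-set continues Set.ofList's fold
theorem pv_fresh_foldl (l : List Int) : ∀ (s : List Int),
    s ++ pvFresh s l = l.foldl PySem.Set.add s := by
  induction l with
  | nil => simp [pvFresh]
  | cons d rest ih =>
    intro s
    by_cases hd : d ∈ s
    · simp only [pvFresh, hd, if_pos, List.foldl_cons, pv_add_eq, ← ih s]
    · simp only [pvFresh, List.foldl_cons, pv_add_eq, if_neg hd]
      rw [← ih (s ++ [d])]
      simp

-- B's tally loop: items = old items plus one (d, degrees.count d) pair per fresh degree
theorem pv_tally (degrees : List Int) (xs : List Int) : ∀ (h : PySem.Dict Int Int),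
    (xs.foldl (fun h d =>
        if h.contains d then h else h.insert d ((degrees.count d : Int))) h).items
      = h.items ++ (pvFresh h.keys xs).map (fun d => (d, (degrees.count d : Int))) := by
  induction xs with
  | nil => simp [pvFresh]
  | cons x rest ih =>
    intro h
    by_cases hx : x ∈ h.keys
    · have hc : h.contains x = true := by
        rw [PySem.Dict.contains_eq_decide_mem_keys]; simpa using hx
      simp only [List.foldl_cons, hc, if_pos, pvFresh, hx]
      exact ih h
    · have hc : h.contains x = false := by
        rw [PySem.Dict.contains_eq_decide_mem_keys]; simpa using hx
      have hkeys : (h.insert x ((degrees.count x : Int))).keys = h.keys ++ [x] := by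
        rw [PySem.Dict.keys_insert_of_not_contains]; simp [hc]
      have hitems : (h.insert x ((degrees.count x : Int))).items
          = h.items ++ [(x, (degrees.count x : Int))] := by
        rw [PySem.Dict.items_insert_of_not_contains]; simp [hc]
      simp only [List.foldl_cons, hc, Bool.false_eq_true, ite_false, pvFresh, hx]
      rw [ih, hitems, hkeys]
      simp

-- ===== VERDICT (by name: the statement is the Claim_ definition above) =====
theorem compute_degree_histogram_spec : Claim_equal_compute_degree_histogram := by
  intro bus_ids branches _
  unfold Spec_compute_degree_histogram compute_degree_histogram compute_degree_histogram_alt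
  dsimp only
  rw [pv_dedup_loop]
  set L : List Int := PySem.List.dedup bus_ids with hL
  -- ===== A's side: its result is Counter(degrees).items for degrees = L.map (count in pvFlat)
  set d0 : PySem.Dict Int Int := bus_ids.foldl (fun d b => d.insert b 0) PySem.Dict.empty with hd0
  have hd0keys : d0.keys = L := by
    rw [hd0]
    rw [PySem.Dict.keys_foldl_insert bus_ids (fun _ _ => (0 : Int)) PySem.Dict.empty]
    simp [PySem.Set.update, PySem.Set.ofList_eq_foldl, PySem.List.dedup_eq_ofList, hL,
      PySem.Dict.keys_empty]
  have hd0getD : ∀ k, d0.getD k 0 = 0 := by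
    intro k
    rw [PySem.Dict.getD_eq_get?_getD, hd0, pv_init_get?]
    split <;> simp [PySem.Dict.get?_empty]
  have hbl := pv_branch_loop branches L d0 hd0keys
  set dA := branches.foldl (fun d br =>
      if br.2.2 = 1 then
        let d := if d.contains br.1 then d.insert br.1 (d.getD br.1 0 + 1) else d
        if d.contains br.2.1 then d.insert br.2.1 (d.getD br.2.1 0 + 1) else d
      else d) d0 with hdA
  have hkeys : dA.keys = L := hbl.1
  have hnodup : dA.keys.Nodup := by rw [hkeys, hL]; exact PySem.List.nodup_dedup bus_ids
  have hgetD : ∀ k, dA.getD k 0 = ((pvFlat L branches).count k : Int) := by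
    intro k; rw [hbl.2 k, hd0getD]; ring
  have hitems : dA.items = L.map (fun b => (b, dA.getD b 0)) := by
    rw [PySem.Dict.items_eq_map_keys dA hnodup 0, hkeys]
  have hhist : dA.items.foldl (fun h p => h.modify p.2 0 (· + 1)) PySem.Dict.empty
      = PySem.Dict.counter (L.map (fun b => dA.getD b 0)) := by
    rw [hitems, PySem.Dict.counter_eq_foldl, List.foldl_map, List.foldl_map]
  rw [hhist, pv_counter_filter, PySem.Dict.items_counter]
  -- ===== B's side: its degrees list is the same list
  have hdeg : L.map (fun b =>
        ((((branches.filter (fun br => br.2.2 == 1)).map (fun br => (br.1, br.2.1))).map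
          (fun p => (if p.1 == b then (1 : Int) else 0) + (if p.2 == b then 1 else 0))).sum))
      = L.map (fun b => dA.getD b 0) := by
    apply List.map_congr_left
    intro b hbL
    rw [hgetD b, ← pv_deg b L hbL branches]
  -- B's tally loop from the empty dict enumerates Set.ofList of the degrees
  rw [pv_tally]
  have hfresh : ∀ l : List Int, pvFresh (PySem.Dict.empty (κ := Int) (ν := Int)).keys l
      = PySem.Set.ofList l := by
    intro l
    have := pv_fresh_foldl l []
    simpa [PySem.Dict.keys_empty, PySem.Set.ofList_eq_foldl] using this
  rw [hfresh]
  simp only [hdeg]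
  simp [show (PySem.Dict.empty : PySem.Dict Int Int).items = [] from rfl]
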